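-- pv_equiv track=rewrite | github.com/netfoxor/stock-chat-bi | backend/nanobot/stock_core.py | _group_numeric_cols
-- ===== SOURCE A (Python) =====
-- _PRICE_COLS = {"open", "high", "low", "close", "pre_close"}
--
-- _VOLUME_COLS = {"vol", "volume"}
--
-- _AMOUNT_COLS = {"amount", "turnover"}
--
-- _PCT_COLS = {"pct_chg", "pct_change", "change_pct", "pctchg"}
--
-- _CHANGE_COLS = {"change", "chg", "change_val"}
--
-- def _group_numeric_cols(cols: list[str]) -> dict[str, list[str]]:
--     groups: dict[str, list[str]] = {
--         "price": [], "volume": [], "amount": [],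
--         "pct": [], "change": [], "other": [],
--     }
--     for c in cols:
--         lc = str(c).lower()
--         if lc in _PRICE_COLS:
--             groups["price"].append(c)
--         elif lc in _VOLUME_COLS:
--             groups["volume"].append(c)
--         elif lc in _AMOUNT_COLS:
--             groups["amount"].append(c)
--         elif lc in _PCT_COLS:
--             groups["pct"].append(c)
--         elif lc in _CHANGE_COLS:
--             groups["change"].append(c)
--         else:
--             groups["other"].append(c)
--     return {k: v for k, v in groups.items() if v}
-- ===== SOURCE B (Python) =====
-- _PRICE_COLS = {"open", "high", "low", "close", "pre_close"}
-- _VOLUME_COLS = {"vol", "volume"}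
-- _AMOUNT_COLS = {"amount", "turnover"}
-- _PCT_COLS = {"pct_chg", "pct_change", "change_pct", "pctchg"}
-- _CHANGE_COLS = {"change", "chg", "change_val"}
--
-- _CATS = [
--     ("price", _PRICE_COLS),
--     ("volume", _VOLUME_COLS),
--     ("amount", _AMOUNT_COLS),
--     ("pct", _PCT_COLS),
--     ("change", _CHANGE_COLS),
-- ]
-- _KNOWN = _PRICE_COLS | _VOLUME_COLS | _AMOUNT_COLS | _PCT_COLS | _CHANGE_COLS
--
--
-- def _group_numeric_cols(cols: list) -> dict:
--     # category-major: one filter pass per category (the five name-sets are disjoint,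
--     # so first-match cascade order is irrelevant), then the leftovers as "other"
--     out = {}
--     for name, names in _CATS:
--         bucket = [c for c in cols if str(c).lower() in names]
--         if bucket:
--             out[name] = bucket
--     other = [c for c in cols if str(c).lower() not in _KNOWN]
--     if other:
--         out["other"] = other
--     return out
-- ===== Notes on version B (the rewrite author's own statement) =====
-- stated objective: alternative
-- what changed: Replaces the single column-major loop that dispatches through a five-way if-elif cascade into a mutable groups dict with a category-major scheme: one membership-filter pass per category (valid since the five name-sets are disjoint) plus a final leftover pass for 'other', building the result dict directly.
import Mathlib
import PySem

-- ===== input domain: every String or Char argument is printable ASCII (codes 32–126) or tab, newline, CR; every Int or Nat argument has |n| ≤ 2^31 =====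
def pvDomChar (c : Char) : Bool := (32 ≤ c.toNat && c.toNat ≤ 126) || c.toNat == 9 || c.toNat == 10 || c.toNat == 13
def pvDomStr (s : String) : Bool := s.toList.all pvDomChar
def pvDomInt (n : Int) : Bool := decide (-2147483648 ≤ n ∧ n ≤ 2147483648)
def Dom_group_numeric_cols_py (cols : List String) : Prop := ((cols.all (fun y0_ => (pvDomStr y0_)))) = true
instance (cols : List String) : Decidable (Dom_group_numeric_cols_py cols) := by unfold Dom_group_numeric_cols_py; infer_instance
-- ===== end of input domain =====

-- B groups category-major (one filter pass per disjoint name-set, then the leftovers) instead of A's single loop with a five-way if-elif cascade into a mutable dict; alternative decomposition, same cost.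


-- ===== PORT A =====
-- Python sets of literal column names → PySem.Set (lists of distinct elements)
def pvPriceCols : List String := ["open", "high", "low", "close", "pre_close"]
def pvVolumeCols : List String := ["vol", "volume"]
def pvAmountCols : List String := ["amount", "turnover"]
def pvPctCols : List String := ["pct_chg", "pct_change", "change_pct", "pctchg"]
def pvChangeCols : List String := ["change", "chg", "change_val"]

-- one iteration of A's loop: lc = str(c).lower(); if-elif cascade appending c to the chosen bucket
def pvAStep (d : PySem.Dict String (List String)) (c : String) : PySem.Dict String (List String) :=
  let lc := PySem.Str.lower c
  if lc ∈ pvPriceCols then d.modify "price" [] (· ++ [c])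
  else if lc ∈ pvVolumeCols then d.modify "volume" [] (· ++ [c])
  else if lc ∈ pvAmountCols then d.modify "amount" [] (· ++ [c])
  else if lc ∈ pvPctCols then d.modify "pct" [] (· ++ [c])
  else if lc ∈ pvChangeCols then d.modify "change" [] (· ++ [c])
  else d.modify "other" [] (· ++ [c])

def group_numeric_cols_py (cols : List String) : List (String × List String) :=
  let groups : PySem.Dict String (List String) :=
    PySem.Dict.ofList [("price", []), ("volume", []), ("amount", []), ("pct", []), ("change", []), ("other", [])]
  let groups := cols.foldl pvAStep groups
  -- {k: v for k, v in groups.items() if v}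
  groups.items.filter (fun kv => !kv.2.isEmpty)

-- ===== PORT B =====
def pvCats : List (String × List String) :=
  [("price", pvPriceCols), ("volume", pvVolumeCols), ("amount", pvAmountCols),
   ("pct", pvPctCols), ("change", pvChangeCols)]
def pvKnown : List String := pvPriceCols ++ pvVolumeCols ++ pvAmountCols ++ pvPctCols ++ pvChangeCols

-- B builds its dict by inserting fresh distinct keys in order, so the assoc list appends exactly
def group_numeric_cols_py_alt (cols : List String) : List (String × List String) :=
  let out := pvCats.foldl (fun out cat =>
    let bucket := cols.filter (fun c => PySem.Str.lower c ∈ cat.2)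
    if !bucket.isEmpty then out ++ [(cat.1, bucket)] else out) []
  let other := cols.filter (fun c => PySem.Str.lower c ∉ pvKnown)
  if !other.isEmpty then out ++ [("other", other)] else out

-- ===== PRECONDITION & SPEC =====
def Spec_group_numeric_cols_py (cols : List String) (out : List (String × List String)) : Prop := out = group_numeric_cols_py_alt cols
instance (cols : List String) (out : List (String × List String)) : Decidable (Spec_group_numeric_cols_py cols out) := by unfold Spec_group_numeric_cols_py; infer_instance

-- ===== CLAIM (what is proved, stated in full; the proofs are below) =====
def Claim_equal_group_numeric_cols_py : Prop := ∀ (cols : List String), Dom_group_numeric_cols_py cols → Spec_group_numeric_cols_py cols (group_numeric_cols_py cols)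

-- ===== LEMMAS AND PROOFS =====

def pvCatF (nset : List String) (cols : List String) : List String :=
  cols.filter (fun c => PySem.Str.lower c ∈ nset)

def pvOtherF (cols : List String) : List String :=
  cols.filter (fun c => PySem.Str.lower c ∉ pvKnown)

lemma pv_price_disj {s : String} (h : s ∈ pvPriceCols) :
    s ∉ pvVolumeCols ∧ s ∉ pvAmountCols ∧ s ∉ pvPctCols ∧ s ∉ pvChangeCols ∧ s ∈ pvKnown := by
  simp [pvPriceCols] at h
  rcases h with rfl|rfl|rfl|rfl|rfl <;> decide

lemma pv_volume_disj {s : String} (h : s ∈ pvVolumeCols) :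
    s ∉ pvAmountCols ∧ s ∉ pvPctCols ∧ s ∉ pvChangeCols ∧ s ∈ pvKnown := by
  simp [pvVolumeCols] at h
  rcases h with rfl|rfl <;> decide

lemma pv_amount_disj {s : String} (h : s ∈ pvAmountCols) :
    s ∉ pvPctCols ∧ s ∉ pvChangeCols ∧ s ∈ pvKnown := by
  simp [pvAmountCols] at h
  rcases h with rfl|rfl <;> decide

lemma pv_pct_disj {s : String} (h : s ∈ pvPctCols) :
    s ∉ pvChangeCols ∧ s ∈ pvKnown := by
  simp [pvPctCols] at h
  rcases h with rfl|rfl|rfl|rfl <;> decide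

lemma pv_change_known {s : String} (h : s ∈ pvChangeCols) : s ∈ pvKnown := by
  simp [pvChangeCols] at h
  rcases h with rfl|rfl|rfl <;> decide

lemma pv_not_known {s : String} (h1 : s ∉ pvPriceCols) (h2 : s ∉ pvVolumeCols)
    (h3 : s ∉ pvAmountCols) (h4 : s ∉ pvPctCols) (h5 : s ∉ pvChangeCols) : s ∉ pvKnown := by
  simp [pvKnown, List.mem_append]
  exact ⟨h1, h2, h3, h4, h5⟩

lemma pv_loop_items : ∀ (cols p v a pc ch o : List String),
    (cols.foldl pvAStep (PySem.Dict.mk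
      [("price", p), ("volume", v), ("amount", a), ("pct", pc), ("change", ch), ("other", o)])).items
    = [("price", p ++ pvCatF pvPriceCols cols), ("volume", v ++ pvCatF pvVolumeCols cols),
       ("amount", a ++ pvCatF pvAmountCols cols), ("pct", pc ++ pvCatF pvPctCols cols),
       ("change", ch ++ pvCatF pvChangeCols cols), ("other", o ++ pvOtherF cols)] := by
  intro cols
  induction cols with
  | nil => intro p v a pc ch o; simp [pvCatF, pvOtherF]
  | cons c rest ih =>
    intro p v a pc ch o
    by_cases h1 : PySem.Str.lower c ∈ pvPriceCols
    · obtain ⟨n2, n3, n4, n5, hk⟩ := pv_price_disj h1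
      simp only [List.foldl_cons, pvAStep, if_pos h1,
        PySem.Dict.modify, PySem.Dict.contains, PySem.Dict.getD, PySem.Dict.get?, PySem.Dict.insert]
      simp only [pvCatF, pvOtherF, List.filter_cons]
      simp [ih, pvCatF, pvOtherF, h1, n2, n3, n4, n5, hk]
    · by_cases h2 : PySem.Str.lower c ∈ pvVolumeCols
      · obtain ⟨n3, n4, n5, hk⟩ := pv_volume_disj h2
        simp only [List.foldl_cons, pvAStep, if_neg h1, if_pos h2,
          PySem.Dict.modify, PySem.Dict.contains, PySem.Dict.getD, PySem.Dict.get?, PySem.Dict.insert]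
        simp [ih, pvCatF, pvOtherF, h1, h2, n3, n4, n5, hk]
      · by_cases h3 : PySem.Str.lower c ∈ pvAmountCols
        · obtain ⟨n4, n5, hk⟩ := pv_amount_disj h3
          simp only [List.foldl_cons, pvAStep, if_neg h1, if_neg h2, if_pos h3,
            PySem.Dict.modify, PySem.Dict.contains, PySem.Dict.getD, PySem.Dict.get?, PySem.Dict.insert]
          simp [ih, pvCatF, pvOtherF, h1, h2, h3, n4, n5, hk]
        · by_cases h4 : PySem.Str.lower c ∈ pvPctCols
          · obtain ⟨n5, hk⟩ := pv_pct_disj h4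
            simp only [List.foldl_cons, pvAStep, if_neg h1, if_neg h2, if_neg h3, if_pos h4,
              PySem.Dict.modify, PySem.Dict.contains, PySem.Dict.getD, PySem.Dict.get?, PySem.Dict.insert]
            simp [ih, pvCatF, pvOtherF, h1, h2, h3, h4, n5, hk]
          · by_cases h5 : PySem.Str.lower c ∈ pvChangeCols
            · have hk := pv_change_known h5
              simp only [List.foldl_cons, pvAStep, if_neg h1, if_neg h2, if_neg h3, if_neg h4, if_pos h5,
                PySem.Dict.modify, PySem.Dict.contains, PySem.Dict.getD, PySem.Dict.get?, PySem.Dict.insert]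
              simp [ih, pvCatF, pvOtherF, h1, h2, h3, h4, h5, hk]
            · have hk := pv_not_known h1 h2 h3 h4 h5
              simp only [List.foldl_cons, pvAStep, if_neg h1, if_neg h2, if_neg h3, if_neg h4, if_neg h5,
                PySem.Dict.modify, PySem.Dict.contains, PySem.Dict.getD, PySem.Dict.get?, PySem.Dict.insert]
              simp [ih, pvCatF, pvOtherF, h1, h2, h3, h4, h5, hk]

-- ===== VERDICT (by name: the statement is the Claim_ definition above) =====
theorem group_numeric_cols_py_spec : Claim_equal_group_numeric_cols_py := by
  intro cols _
  unfold Spec_group_numeric_cols_py group_numeric_cols_py group_numeric_cols_py_alt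
  have e : (PySem.Dict.ofList
      [("price", ([] : List String)), ("volume", []), ("amount", []), ("pct", []), ("change", []), ("other", [])]
      : PySem.Dict String (List String))
      = PySem.Dict.mk [("price", []), ("volume", []), ("amount", []), ("pct", []), ("change", []), ("other", [])] := by
    rfl
  dsimp only
  rw [e, pv_loop_items cols [] [] [] [] [] []]
  simp only [List.nil_append, pvCats, List.foldl_cons, List.foldl_nil, pvCatF, pvOtherF]
  set fp := List.filter (fun c => decide (PySem.Str.lower c ∈ pvPriceCols)) cols with hfp
  set fv := List.filter (fun c => decide (PySem.Str.lower c ∈ pvVolumeCols)) cols with hfv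
  set fa := List.filter (fun c => decide (PySem.Str.lower c ∈ pvAmountCols)) cols with hfa
  set fpc := List.filter (fun c => decide (PySem.Str.lower c ∈ pvPctCols)) cols with hfpc
  set fch := List.filter (fun c => decide (PySem.Str.lower c ∈ pvChangeCols)) cols with hfch
  set fo := List.filter (fun c => decide (PySem.Str.lower c ∉ pvKnown)) cols with hfo
  clear e hfp hfv hfa hfpc hfch hfo
  simp only [List.filter_cons, List.filter_nil]
  split_ifs <;> simp_all
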